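-- pv_equiv track=rewrite | github.com/silaspassosf/pjeplus | tr.py | _checar_procuracao_e_identidade
-- ===== SOURCE A (Python) =====
-- import unicodedata
-- from typing import List, Dict, Any
--
-- def _norm(t: str) -> str:
--     return unicodedata.normalize('NFD', t).encode('ascii', 'ignore').decode().lower()
--
-- _TERMOS_PROC_TITULO  = ['procuracao', 'mandato']
--
-- _TERMOS_ID_TITULO    = ['rg', 'cnh', 'documento de identidade', 'identidade', 'doc identidade']
--
-- _TERMOS_PROC_BODY    = ['outorgo', 'poderes', 'por este instrumento particular', 'constituir como',
--                         'procuracao', 'mandato', 'outorgante', 'outorgado']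
--
-- _TERMOS_ID_BODY      = ['registro geral', 'carteira de identidade', 'carteira nacional de habilitacao',
--                         'secretaria de seguranca publica', 'documento de identidade',
--                         'data de nascimento', 'filiacao', 'naturalidade']
--
-- def _checar_procuracao_e_identidade(
--     anexos: List[Dict[str, Any]], nome_reclamante: str = ''
-- ) -> str:
--     proc_via = None   # 'titulo' | 'conteudo:<titulo_anexo>'
--     id_via   = None
--
--     for anx in anexos:
--         tref  = _norm(f"{anx.get('titulo', '')} {anx.get('tipo', '')}")
--         tbody = _norm(anx.get('texto') or '')
--         tnome = (anx.get('titulo') or anx.get('tipo') or '').strip()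
--
--         # ProcuraГғВ§ГғВЈo
--         if proc_via is None:
--             if any(t in tref for t in _TERMOS_PROC_TITULO):
--                 proc_via = 'titulo'
--             elif tbody and any(t in tbody for t in _TERMOS_PROC_BODY):
--                 proc_via = f'conteudo:"{tnome or "(sem titulo)"}"'
--
--         # Documento de identidade
--         if id_via is None:
--             if any(t in tref for t in _TERMOS_ID_TITULO):
--                 id_via = 'titulo'
--             elif tbody and any(t in tbody for t in _TERMOS_ID_BODY):
--                 id_via = f'conteudo:"{tnome or "(sem titulo)"}"'
--
--     # Cross-check: nome do reclamante presente na procuraГғВ§ГғВЈo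
--     extra_proc = ''
--     if proc_via and nome_reclamante:
--         nome_norm = _norm(nome_reclamante)
--         for anx in anexos:
--             tref  = _norm(f"{anx.get('titulo', '')} {anx.get('tipo', '')}")
--             tbody = _norm(anx.get('texto') or '')
--             if (any(t in tref for t in _TERMOS_PROC_TITULO)
--                     or (tbody and any(t in tbody for t in _TERMOS_PROC_BODY))):
--                 sobrenome = nome_norm.split()[-1] if nome_norm.split() else ''
--                 if sobrenome and len(sobrenome) > 3 and sobrenome in tbody:
--                     extra_proc = ' [nome reclamante localizado na procuracao]'
--                 else:
--                     extra_proc = ' [ATENCAO: nome reclamante nao localizado na procuracao]'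
--                 break
--
--     tem_proc = proc_via is not None
--     tem_id   = id_via   is not None
--
--     if tem_proc and tem_id:
--         return (f'B1_DOCS: OK - procuracao ({proc_via}){extra_proc} '
--                 f'e doc identidade ({id_via}) presentes')
--     if not tem_proc and not tem_id:
--         return 'B1_DOCS: ALERTA - faltam procuracao e copia de documento de identidade em anexos separados'
--     if not tem_proc:
--         return f'B1_DOCS: ALERTA - falta procuracao em anexo (doc identidade: {id_via})'
--     return f'B1_DOCS: ALERTA - falta copia de documento de identidade em anexo (procuracao: {proc_via}{extra_proc})'
-- ===== SOURCE B (Python) =====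
-- import unicodedata
-- from typing import List, Dict, Any
--
-- def _norm(t: str) -> str:
--     return unicodedata.normalize('NFD', t).encode('ascii', 'ignore').decode().lower()
--
-- _TERMOS_PROC_TITULO  = ['procuracao', 'mandato']
--
-- _TERMOS_ID_TITULO    = ['rg', 'cnh', 'documento de identidade', 'identidade', 'doc identidade']
--
-- _TERMOS_PROC_BODY    = ['outorgo', 'poderes', 'por este instrumento particular', 'constituir como',
--                         'procuracao', 'mandato', 'outorgante', 'outorgado']
--
-- _TERMOS_ID_BODY      = ['registro geral', 'carteira de identidade', 'carteira nacional de habilitacao',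
--                         'secretaria de seguranca publica', 'documento de identidade',
--                         'data de nascimento', 'filiacao', 'naturalidade']
--
-- def _checar_procuracao_e_identidade(
--     anexos: List[Dict[str, Any]], nome_reclamante: str = ''
-- ) -> str:
--     # Single pass: proc is (via, extra) decided at the first proc-matching
--     # attachment (the same one the two-scan version's cross-check loop finds);
--     # stop as soon as both documents are found.
--     proc = None       # (via, extra_proc)
--     id_via = None
--
--     for anx in anexos:
--         if proc is not None and id_via is not None:
--             break
--         tref  = _norm(f"{anx.get('titulo', '')} {anx.get('tipo', '')}")
--         tbody = _norm(anx.get('texto') or '')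
--         tnome = (anx.get('titulo') or anx.get('tipo') or '').strip()
--
--         if proc is None:
--             via = None
--             if any(t in tref for t in _TERMOS_PROC_TITULO):
--                 via = 'titulo'
--             elif tbody and any(t in tbody for t in _TERMOS_PROC_BODY):
--                 via = f'conteudo:"{tnome or "(sem titulo)"}"'
--             if via is not None:
--                 extra = ''
--                 if nome_reclamante:
--                     palavras = _norm(nome_reclamante).split()
--                     sobrenome = palavras[-1] if palavras else ''
--                     extra = (' [nome reclamante localizado na procuracao]'
--                              if sobrenome and len(sobrenome) > 3 and sobrenome in tbody
--                              else ' [ATENCAO: nome reclamante nao localizado na procuracao]')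
--                 proc = (via, extra)
--
--         if id_via is None:
--             if any(t in tref for t in _TERMOS_ID_TITULO):
--                 id_via = 'titulo'
--             elif tbody and any(t in tbody for t in _TERMOS_ID_BODY):
--                 id_via = f'conteudo:"{tnome or "(sem titulo)"}"'
--
--     if proc is not None and id_via is not None:
--         return (f'B1_DOCS: OK - procuracao ({proc[0]}){proc[1]} '
--                 f'e doc identidade ({id_via}) presentes')
--     if proc is None and id_via is None:
--         return 'B1_DOCS: ALERTA - faltam procuracao e copia de documento de identidade em anexos separados'
--     if proc is None:
--         return f'B1_DOCS: ALERTA - falta procuracao em anexo (doc identidade: {id_via})'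
--     return f'B1_DOCS: ALERTA - falta copia de documento de identidade em anexo (procuracao: {proc[0]}{proc[1]})'
-- ===== Notes on version B (the rewrite author's own statement) =====
-- stated objective: alternative
-- what changed: B fuses A's two scans over anexos (one setting proc_via/id_via, a second full rescan computing the cross-check message) into a single early-exiting pass that decides the cross-check message on the spot at the first proc-matching attachment.
import Mathlib
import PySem

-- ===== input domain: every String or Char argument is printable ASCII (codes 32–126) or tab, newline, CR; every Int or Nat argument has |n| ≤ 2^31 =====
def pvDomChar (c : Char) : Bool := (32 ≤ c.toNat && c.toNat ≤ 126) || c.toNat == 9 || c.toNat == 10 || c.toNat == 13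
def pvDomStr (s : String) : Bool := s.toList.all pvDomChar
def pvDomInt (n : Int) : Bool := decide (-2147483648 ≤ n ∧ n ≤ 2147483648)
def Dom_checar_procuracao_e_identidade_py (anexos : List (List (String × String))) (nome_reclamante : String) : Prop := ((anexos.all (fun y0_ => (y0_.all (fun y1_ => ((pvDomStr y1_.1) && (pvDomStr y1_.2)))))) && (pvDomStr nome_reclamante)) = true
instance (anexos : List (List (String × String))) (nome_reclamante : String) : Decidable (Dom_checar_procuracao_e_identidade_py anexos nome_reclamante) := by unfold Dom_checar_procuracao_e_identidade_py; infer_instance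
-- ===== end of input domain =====

-- B fuses A's two scans over `anexos` into one early-exiting pass that decides the
-- proc cross-check at the first proc-matching attachment; return values are proved equal.

-- shared module-level material of both Pythons: _norm and the four keyword lists.
-- _norm: on the printable-ASCII domain NFD normalization and ascii-encode/decode are
-- the identity, so _norm is exactly str.lower (ported with PySem.Str.lower).
def pvNorm (t : String) : String := PySem.Str.lower t

def pvTermosProcTitulo : List String := ["procuracao", "mandato"]

def pvTermosIdTitulo : List String := ["rg", "cnh", "documento de identidade", "identidade", "doc identidade"]

def pvTermosProcBody : List String :=
  ["outorgo", "poderes", "por este instrumento particular", "constituir como",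
   "procuracao", "mandato", "outorgante", "outorgado"]

def pvTermosIdBody : List String :=
  ["registro geral", "carteira de identidade", "carteira nacional de habilitacao",
   "secretaria de seguranca publica", "documento de identidade",
   "data de nascimento", "filiacao", "naturalidade"]

-- per-attachment expressions both Pythons compute verbatim
def pvTref (anx : List (String × String)) : String :=
  pvNorm (PySem.Str.join "" [PySem.Dict.getD ⟨anx⟩ "titulo" "", " ", PySem.Dict.getD ⟨anx⟩ "tipo" ""])

def pvTbody (anx : List (String × String)) : String :=
  pvNorm (PySem.Dict.getD ⟨anx⟩ "texto" "")   -- `anx.get('texto') or ''`: None and '' both give ''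

def pvTnome (anx : List (String × String)) : String :=
  PySem.Str.strip (if PySem.Dict.getD ⟨anx⟩ "titulo" "" ≠ "" then PySem.Dict.getD ⟨anx⟩ "titulo" ""
                   else PySem.Dict.getD ⟨anx⟩ "tipo" "")   -- `anx.get('titulo') or anx.get('tipo') or ''`

def pvAnyIn (terms : List String) (s : String) : Bool := terms.any (fun t => PySem.Str.isIn t s)

def pvConteudoVia (tnome : String) : String :=
  PySem.Str.join "" ["conteudo:\"", if tnome ≠ "" then tnome else "(sem titulo)", "\""]

-- the cross-check message, given the normalized claimant name and a matching body
def pvExtra (nn tbody : String) : String :=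
  let palavras := PySem.Str.split₀ nn
  let sobrenome := palavras.getLast?.getD ""
  if sobrenome ≠ "" ∧ PySem.Str.len sobrenome > 3 ∧ PySem.Str.isIn sobrenome tbody = true then
    " [nome reclamante localizado na procuracao]"
  else
    " [ATENCAO: nome reclamante nao localizado na procuracao]"

-- ===== PORT A =====
-- A's first loop: fold over the attachments carrying (proc_via, id_via)
def pvLoop1 : List (List (String × String)) → Option String → Option String → Option String × Option String
  | [], p, i => (p, i)
  | anx :: rest, p, i =>
    let tref := pvTref anx
    let tbody := pvTbody anx
    let tnome := pvTnome anx
    let p' := if p = none then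
        (if pvAnyIn pvTermosProcTitulo tref then some "titulo"
         else if tbody ≠ "" ∧ pvAnyIn pvTermosProcBody tbody = true then some (pvConteudoVia tnome)
         else none)
      else p
    let i' := if i = none then
        (if pvAnyIn pvTermosIdTitulo tref then some "titulo"
         else if tbody ≠ "" ∧ pvAnyIn pvTermosIdBody tbody = true then some (pvConteudoVia tnome)
         else none)
      else i
    pvLoop1 rest p' i'

-- A's second loop (cross-check): scan for the first proc-matching attachment, break
def pvLoop2 (nn : String) : List (List (String × String)) → String
  | [] => ""
  | anx :: rest =>
    let tref := pvTref anx
    let tbody := pvTbody anx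
    if pvAnyIn pvTermosProcTitulo tref = true ∨ (tbody ≠ "" ∧ pvAnyIn pvTermosProcBody tbody = true) then
      pvExtra nn tbody
    else pvLoop2 nn rest

def checar_procuracao_e_identidade_py (anexos : List (List (String × String))) (nome_reclamante : String) : String :=
  let r := pvLoop1 anexos none none
  let proc_via := r.1
  let id_via := r.2
  let extra_proc := if proc_via ≠ none ∧ nome_reclamante ≠ "" then pvLoop2 (pvNorm nome_reclamante) anexos else ""
  if proc_via ≠ none ∧ id_via ≠ none then
    PySem.Str.join "" ["B1_DOCS: OK - procuracao (", proc_via.getD "", ")", extra_proc,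
                       " e doc identidade (", id_via.getD "", ") presentes"]
  else if proc_via = none ∧ id_via = none then
    "B1_DOCS: ALERTA - faltam procuracao e copia de documento de identidade em anexos separados"
  else if proc_via = none then
    PySem.Str.join "" ["B1_DOCS: ALERTA - falta procuracao em anexo (doc identidade: ", id_via.getD "", ")"]
  else
    PySem.Str.join "" ["B1_DOCS: ALERTA - falta copia de documento de identidade em anexo (procuracao: ",
                       proc_via.getD "", extra_proc, ")"]

-- ===== PORT B =====
-- B's single pass: proc carries (via, extra) decided on the spot; break when both found
def pvLoopB (n : String) : List (List (String × String)) → Option (String × String) → Option String → Option (String × String) × Option String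
  | [], p, i => (p, i)
  | anx :: rest, p, i =>
    if p.isSome && i.isSome then (p, i)
    else
      let tref := pvTref anx
      let tbody := pvTbody anx
      let tnome := pvTnome anx
      let p' := if p = none then
          (let via : Option String :=
            if pvAnyIn pvTermosProcTitulo tref then some "titulo"
            else if tbody ≠ "" ∧ pvAnyIn pvTermosProcBody tbody = true then some (pvConteudoVia tnome)
            else none
           match via with
           | some v => some (v, if n ≠ "" then pvExtra (pvNorm n) tbody else "")
           | none => none)
        else p
      let i' := if i = none then
          (if pvAnyIn pvTermosIdTitulo tref then some "titulo"
           else if tbody ≠ "" ∧ pvAnyIn pvTermosIdBody tbody = true then some (pvConteudoVia tnome)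
           else none)
        else i
      pvLoopB n rest p' i'

def checar_procuracao_e_identidade_py_alt (anexos : List (List (String × String))) (nome_reclamante : String) : String :=
  let r := pvLoopB nome_reclamante anexos none none
  match r.1, r.2 with
  | some (v, e), some idv =>
    PySem.Str.join "" ["B1_DOCS: OK - procuracao (", v, ")", e, " e doc identidade (", idv, ") presentes"]
  | none, none =>
    "B1_DOCS: ALERTA - faltam procuracao e copia de documento de identidade em anexos separados"
  | none, some idv =>
    PySem.Str.join "" ["B1_DOCS: ALERTA - falta procuracao em anexo (doc identidade: ", idv, ")"]
  | some (v, e), none =>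
    PySem.Str.join "" ["B1_DOCS: ALERTA - falta copia de documento de identidade em anexo (procuracao: ", v, e, ")"]

-- ===== PRECONDITION & SPEC =====
def Spec_checar_procuracao_e_identidade_py (anexos : List (List (String × String))) (nome_reclamante : String) (out : String) : Prop := out = checar_procuracao_e_identidade_py_alt anexos nome_reclamante
instance (anexos : List (List (String × String))) (nome_reclamante : String) (out : String) : Decidable (Spec_checar_procuracao_e_identidade_py anexos nome_reclamante out) := by unfold Spec_checar_procuracao_e_identidade_py; infer_instance

-- ===== CLAIM (what is proved, stated in full; the proofs are below) =====
def Claim_equal_checar_procuracao_e_identidade_py : Prop := ∀ (anexos : List (List (String × String))) (nome_reclamante : String), Dom_checar_procuracao_e_identidade_py anexos nome_reclamante → Spec_checar_procuracao_e_identidade_py anexos nome_reclamante (checar_procuracao_e_identidade_py anexos nome_reclamante)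

-- ===== LEMMAS AND PROOFS =====

-- once both of A's flags are set, the rest of the fold changes nothing
theorem pvLoop1_some_some (l : List (List (String × String))) (v w : String) :
    pvLoop1 l (some v) (some w) = (some v, some w) := by
  induction l with
  | nil => rfl
  | cons anx rest ih => simp only [pvLoop1, reduceCtorEq, if_false]; exact ih

-- A's proc flag is monotone
theorem pvLoop1_fst_some (l : List (List (String × String))) (v : String) (i : Option String) :
    (pvLoop1 l (some v) i).1 = some v := by
  induction l generalizing i with
  | nil => rfl
  | cons anx rest ih => simp only [pvLoop1, reduceCtorEq, if_false]; exact ih _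

-- once B's proc slot is filled, B only completes the id slot, exactly as A's fold does
theorem pvLoopB_some (n : String) (l : List (List (String × String))) (pe : String × String) (i : Option String) :
    pvLoopB n l (some pe) i = (some pe, (pvLoop1 l (some pe.1) i).2) := by
  induction l generalizing i with
  | nil => rfl
  | cons anx rest ih =>
    cases i with
    | some w => rw [pvLoop1_some_some]; rfl
    | none =>
      simp only [pvLoopB, pvLoop1, Option.isSome_some, Option.isSome_none, Bool.and_false,
        Bool.false_eq_true, if_false, reduceCtorEq]
      exact ih _

-- how B enriches a proc verdict with the cross-check message (proof-side only)
def pvPost (n : String) (p : Option String) (e : String) : Option (String × String) :=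
  match p with
  | none => none
  | some v => some (v, if n ≠ "" then e else "")

-- the heart: B's pass from a proc-less state = A's fold plus A's cross-check scan
theorem pvLoopB_none (n : String) (l : List (List (String × String))) (i : Option String) :
    pvLoopB n l none i =
      (pvPost n (pvLoop1 l none i).1 (pvLoop2 (pvNorm n) l), (pvLoop1 l none i).2) := by
  induction l generalizing i with
  | nil => rfl
  | cons anx rest ih =>
    by_cases ht : pvAnyIn pvTermosProcTitulo (pvTref anx) = true
    · simp only [pvLoopB, pvLoop1, pvLoop2, ht, if_true, true_or, Option.isSome_none,
        Bool.false_and, Bool.false_eq_true, if_false,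
        pvLoopB_some, pvLoop1_fst_some, pvPost]
    · by_cases hb : pvTbody anx ≠ "" ∧ pvAnyIn pvTermosProcBody (pvTbody anx) = true
      · simp only [pvLoopB, pvLoop1, pvLoop2, ht, hb.1, hb.2, ne_eq, and_true, not_false_eq_true,
          if_true, if_false, false_or, Option.isSome_none, Bool.false_and, Bool.false_eq_true,
          pvLoopB_some, pvLoop1_fst_some, pvPost]
      · simp only [pvLoopB, pvLoop1, pvLoop2, ht, hb, if_false, false_or, Option.isSome_none,
          Bool.false_and, Bool.false_eq_true]
        exact ih _

theorem checar_procuracao_e_identidade_py_eq (anexos : List (List (String × String))) (n : String) :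
    checar_procuracao_e_identidade_py anexos n = checar_procuracao_e_identidade_py_alt anexos n := by
  unfold checar_procuracao_e_identidade_py checar_procuracao_e_identidade_py_alt
  rw [pvLoopB_none]
  rcases hp : (pvLoop1 anexos none none).1 with _ | v <;>
    rcases hi : (pvLoop1 anexos none none).2 with _ | w <;>
      by_cases hn : n = "" <;>
        simp only [pvPost, hp, hi, hn, ne_eq, not_true_eq_false, not_false_eq_true, and_true,
          and_false, if_true, if_false, reduceCtorEq, Option.getD_some]

-- ===== VERDICT (by name: the statement is the Claim_ definition above) =====
theorem checar_procuracao_e_identidade_py_spec : Claim_equal_checar_procuracao_e_identidade_py := by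
  intro anexos nome_reclamante _
  unfold Spec_checar_procuracao_e_identidade_py
  exact checar_procuracao_e_identidade_py_eq anexos nome_reclamante
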